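-- pv_equiv track=rewrite | github.com/Saathy-AI/saathy | src/saathy/chunking/strategies/email.py | _split_email_parts
-- ===== SOURCE A (Python) =====
-- def _split_email_parts(content: str) -> tuple[str, str]:
--     """Split email content into headers and body parts."""
--     lines = content.split('\n')
--     header_lines = []
--     body_lines = []
--     in_body = False
--
--     for line in lines:
--         if line.strip() == '' and header_lines:
--             in_body = True
--             continue
--
--         if in_body:
--             body_lines.append(line)
--         else:
--             header_lines.append(line)
--
--     return '\n'.join(header_lines), '\n'.join(body_lines)
-- ===== SOURCE B (Python) =====
-- def _split_email_parts(content: str) -> tuple[str, str]: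
--     """Split email content into headers and body parts."""
--     lines = content.split('\n')
--     split_at = next((k for k, line in enumerate(lines)
--                      if k > 0 and line.strip() == ''), None)
--     if split_at is None:
--         return '\n'.join(lines), ''
--     header = '\n'.join(lines[:split_at])
--     body = '\n'.join(l for l in lines[split_at + 1:] if l.strip() != '')
--     return header, body
-- ===== Notes on version B (the rewrite author's own statement) =====
-- stated objective: simpler
-- what changed: Replaces A's per-line state machine (mutable header/body accumulators with an in_body flag) by locating the first blank line past index 0 and slicing the line list into header and filtered body.
import Mathlib
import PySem

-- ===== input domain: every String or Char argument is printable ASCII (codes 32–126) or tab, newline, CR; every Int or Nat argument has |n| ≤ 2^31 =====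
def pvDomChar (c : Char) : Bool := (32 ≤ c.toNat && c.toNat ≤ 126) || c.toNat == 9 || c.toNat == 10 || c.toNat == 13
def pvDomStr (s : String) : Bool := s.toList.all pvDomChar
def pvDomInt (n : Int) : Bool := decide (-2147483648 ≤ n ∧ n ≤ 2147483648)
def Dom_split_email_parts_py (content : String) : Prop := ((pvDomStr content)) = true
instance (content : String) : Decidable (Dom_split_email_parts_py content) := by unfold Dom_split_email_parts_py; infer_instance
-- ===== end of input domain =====

-- B replaces A's per-line state machine by locating the first blank line past index 0 and slicing (objective: simpler decomposition, same cost).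

-- ===== PORT A =====
-- A's loop body (the state is (header_lines, body_lines, in_body)); 'continue' = return the state with in_body set.
def pvStepA (st : List String × List String × Bool) (line : String) : List String × List String × Bool :=
  if PySem.Str.strip line == "" && !st.1.isEmpty then (st.1, st.2.1, true)
  else if st.2.2 then (st.1, st.2.1 ++ [line], st.2.2)
  else (st.1 ++ [line], st.2.1, st.2.2)

def split_email_parts_py (content : String) : String × String :=
  let lines := (PySem.Str.split? content "\n").getD []
  let st := lines.foldl pvStepA ([], [], false)
  (PySem.Str.join "\n" st.1, PySem.Str.join "\n" st.2.1)

-- ===== PORT B =====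
def split_email_parts_py_alt (content : String) : String × String :=
  let lines := (PySem.Str.split? content "\n").getD []
  match (PySem.List.enumerate lines).find? (fun kl => decide (0 < kl.1) && (PySem.Str.strip kl.2 == "")) with
  | none => (PySem.Str.join "\n" lines, "")
  | some kl =>
      (PySem.Str.join "\n" (PySem.List.slice lines none (some kl.1)),
       PySem.Str.join "\n" ((PySem.List.slice lines (some (kl.1 + 1)) none).filter
         (fun l => !(PySem.Str.strip l == ""))))

-- ===== PRECONDITION & SPEC =====
def Spec_split_email_parts_py (content : String) (out : String × String) : Prop := out = split_email_parts_py_alt content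
instance (content : String) (out : String × String) : Decidable (Spec_split_email_parts_py content out) := by unfold Spec_split_email_parts_py; infer_instance

-- ===== CLAIM (what is proved, stated in full; the proofs are below) =====
def Claim_equal_split_email_parts_py : Prop := ∀ (content : String), Dom_split_email_parts_py content → Spec_split_email_parts_py content (split_email_parts_py content)

-- ===== LEMMAS AND PROOFS =====

/-- Index of the first blank line (proof-side helper). -/
def pvFirstBlank : List String → Option Nat
  | [] => none
  | l :: ls => if PySem.Str.strip l == "" then some 0 else (pvFirstBlank ls).map (· + 1)

lemma pvBodyPhase (ls : List String) : ∀ (h b : List String), h ≠ [] →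
    ls.foldl pvStepA (h, b, true) = (h, b ++ ls.filter (fun l => !(PySem.Str.strip l == "")), true) := by
  induction ls with
  | nil => intro h b _; simp
  | cons l ls ih =>
      intro h b hh
      by_cases hb : PySem.Str.strip l == ""
      · simp [pvStepA, hb, hh, ih _ _ hh]
      · simp [pvStepA, hb, ih _ _ hh]

lemma pvHeaderPhase (ls : List String) : ∀ (h : List String), h ≠ [] →
    ls.foldl pvStepA (h, [], false) =
      match pvFirstBlank ls with
      | none => (h ++ ls, [], false)
      | some j => (h ++ ls.take j, (ls.drop (j + 1)).filter (fun l => !(PySem.Str.strip l == "")), true) := by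
  induction ls with
  | nil => intro h hh; simp [pvFirstBlank]
  | cons l ls ih =>
      intro h hh
      by_cases hb : PySem.Str.strip l == ""
      · have hemp : h.isEmpty = false := by simpa [List.isEmpty_iff] using hh
        simp [pvFirstBlank, hb, pvStepA, hemp, pvBodyPhase _ _ _ hh]
      · have step : pvStepA (h, [], false) l = (h ++ [l], [], false) := by simp [pvStepA, hb]
        rw [List.foldl_cons, step, ih (h ++ [l]) (by simp)]
        cases hfb : pvFirstBlank ls with
        | none => simp [pvFirstBlank, hb, hfb]
        | some j => simp [pvFirstBlank, hb, hfb]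

lemma pvFindEnum (ls : List String) : ∀ (s : Int), 1 ≤ s →
    (PySem.List.enumerate ls s).find? (fun kl => decide (0 < kl.1) && (PySem.Str.strip kl.2 == "")) =
      (pvFirstBlank ls).map (fun (j : Nat) => ((s + (j : Int)), ls.getD j "")) := by
  induction ls with
  | nil => intro s hs; simp [PySem.List.enumerate_nil, pvFirstBlank]
  | cons l ls ih =>
      intro s hs
      have hpos : decide (0 < s) = true := by simp; omega
      by_cases hb : PySem.Str.strip l == ""
      · simp [PySem.List.enumerate_cons, hpos, hb, pvFirstBlank]
      · rw [PySem.List.enumerate_cons]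
        rw [List.find?_cons_of_neg (by simp [hpos, hb]), ih (s + 1) (by omega)]
        cases hfb : pvFirstBlank ls with
        | none => simp [pvFirstBlank, hb, hfb]
        | some j =>
            simp [pvFirstBlank, hb, hfb]
            omega

-- ===== VERDICT (by name: the statement is the Claim_ definition above) =====
theorem split_email_parts_py_spec : Claim_equal_split_email_parts_py := by
  intro content _
  unfold Spec_split_email_parts_py split_email_parts_py split_email_parts_py_alt
  cases hl : (PySem.Str.split? content "\n").getD [] with
  | nil => simp [PySem.List.enumerate_nil]; decide
  | cons l0 rest =>
      dsimp only
      have step0 : pvStepA ([], [], false) l0 = ([l0], [], false) := by simp [pvStepA]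
      rw [List.foldl_cons, step0, pvHeaderPhase rest [l0] (by simp)]
      rw [PySem.List.enumerate_cons, List.find?_cons_of_neg (by simp),
        show (0:Int) + 1 = 1 from rfl, pvFindEnum rest 1 le_rfl]
      cases hfb : pvFirstBlank rest with
      | none => simp; decide
      | some j =>
          have h1 : (1 + (j : Int)) = ((j + 1 : Nat) : Int) := by push_cast; ring
          have h2 : (((j + 1 : Nat) : Int) + 1) = ((j + 2 : Nat) : Int) := by push_cast; ring
          simp only [Option.map_some]
          rw [h1, h2, PySem.List.slice_to_natCast, PySem.List.slice_from_natCast]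
          simp
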